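-- pv_equiv track=rewrite | github.com/davidma/AdventOfCode2025 | Day11/part2.py | dfs
-- ===== SOURCE A (Python) =====
-- def dfs(edges:dict, vertex:str, goal:str, cache:dict):
--
--     ## If we have reached goal vertex, we are done with this branch!
--     if vertex == goal:
--         return 1
--     else:
--         ## Check if this is a dead-end
--         if vertex in edges:
--             res = 0
--
--             ## Not a dead end, lets continue down the list of edges leading from this node
--             for nxt in edges[vertex]:
--                 if nxt in cache:
--                     ## we've done this branch before - just add cached result
--                     res += cache[nxt]
--                 else:
--                     ## New branch - we need to recursivly search it
--                     res += dfs(edges,nxt,goal,cache)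
--
--             ## Cache sum of all results in this branch, so we dont have to calculate it ever again
--             cache[vertex] = res
--             return res
--         else:
--             ## Dead-end!!
--             return 0
-- ===== SOURCE B (Python) =====
-- def dfs(edges: dict, vertex: str, goal: str, cache: dict):
--     # Iterative post-order DFS with an explicit stack instead of recursion.
--     # Return value only: does not mutate the caller's cache (A writes into it).
--     memo = dict(cache)
--     stack = [[vertex, 0, 0]]  # frame: [node, next-child index, partial sum]
--     result = 0
--     while stack:
--         v, i, acc = stack[-1]
--         if v == goal:
--             stack.pop()
--             value = 1
--         elif v not in edges:
--             stack.pop()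
--             value = 0
--         else:
--             nbrs = edges[v]
--             if i < len(nbrs):
--                 nxt = nbrs[i]
--                 stack[-1][1] = i + 1
--                 if nxt in memo:
--                     stack[-1][2] = acc + memo[nxt]
--                 else:
--                     stack.append([nxt, 0, 0])
--                 continue
--             stack.pop()
--             value = acc
--             memo[v] = value
--         if stack:
--             stack[-1][2] += value
--         else:
--             result = value
--     return result
-- ===== Notes on version B (the rewrite author's own statement) =====
-- stated objective: alternative
-- what changed: Replaced A's recursive memoized DFS by an iterative post-order DFS driven by an explicit stack of (node, child-index, partial-sum) frames with the memo threaded through the loop; B computes the same count without recursion and without mutating the caller's cache.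
import Mathlib
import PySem

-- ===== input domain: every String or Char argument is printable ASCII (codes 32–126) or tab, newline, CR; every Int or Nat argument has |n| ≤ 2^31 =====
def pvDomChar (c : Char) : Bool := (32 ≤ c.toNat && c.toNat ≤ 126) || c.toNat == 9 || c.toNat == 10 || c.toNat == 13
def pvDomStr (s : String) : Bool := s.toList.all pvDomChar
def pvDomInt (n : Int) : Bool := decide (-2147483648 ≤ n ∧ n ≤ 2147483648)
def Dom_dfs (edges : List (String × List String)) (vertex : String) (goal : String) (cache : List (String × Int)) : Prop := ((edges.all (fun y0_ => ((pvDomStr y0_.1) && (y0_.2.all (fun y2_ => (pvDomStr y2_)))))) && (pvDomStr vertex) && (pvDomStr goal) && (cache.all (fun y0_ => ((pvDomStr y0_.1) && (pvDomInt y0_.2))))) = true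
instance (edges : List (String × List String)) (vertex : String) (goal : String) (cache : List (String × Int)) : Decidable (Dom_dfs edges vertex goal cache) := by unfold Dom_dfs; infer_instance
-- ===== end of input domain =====

-- B replaces A's recursive memoized DFS by an iterative explicit-stack post-order DFS (return value
-- only: Python A mutates the caller's cache dict, B does not).

-- ===== PORT A =====
-- A's recursion carries the mutated cache as threaded state; fuel is only a totality guard
-- (none = the recursion of the Python would not have returned; excluded by Pre_dfs).
-- The for-loop over edges[vertex] is the helper dfsLoop ('rec' is the recursive call at lower fuel).
def dfsLoop (rec : String → PySem.Dict String Int → Option (Int × PySem.Dict String Int)) :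
    List String → Int → PySem.Dict String Int → Option (Int × PySem.Dict String Int)
  | [], res, cache => some (res, cache)
  | nxt :: rest, res, cache =>
    match cache.get? nxt with
    | some x => dfsLoop rec rest (res + x) cache          -- nxt in cache
    | none =>
      match rec nxt cache with                            -- res += dfs(edges, nxt, goal, cache)
      | some (r, c) => dfsLoop rec rest (res + r) c
      | none => none

def dfsA (edges : PySem.Dict String (List String)) (goal : String) :
    Nat → String → PySem.Dict String Int → Option (Int × PySem.Dict String Int)
  | 0, _, _ => none
  | fuel+1, v, cache =>
    if v == goal then some (1, cache)
    else
      match edges.get? v with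
      | some nbrs =>
        match dfsLoop (fun nx c => dfsA edges goal fuel nx c) nbrs 0 cache with
        | some (res, c) => some (res, c.insert v res)     -- cache[vertex] = res
        | none => none
      | none => some (0, cache)                           -- dead-end

def dfs (edges : List (String × List String)) (vertex : String) (goal : String) (cache : List (String × Int)) : Int :=
  match dfsA (PySem.Dict.mk edges) goal (edges.length + 2) vertex (PySem.Dict.mk cache) with
  | some (r, _) => r
  | none => 0

-- ===== PORT B =====
-- Iterative post-order DFS: a stack of frames (node, next-child index, partial sum), memo threaded
-- through the loop.  fuel = one unit per while-iteration, a totality guard only.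
-- finishM is the tail of the loop body: propagate a finished frame's value to the parent (or return it).
def finishM (rec : List (String × Nat × Int) → PySem.Dict String Int → Option Int)
    (value : Int) (rest : List (String × Nat × Int)) (memo : PySem.Dict String Int) : Option Int :=
  match rest with
  | [] => some value                                      -- stack empty: result = value
  | (p, j, a) :: r => rec ((p, j, a + value) :: r) memo   -- stack[-1][2] += value

def runM (edges : PySem.Dict String (List String)) (goal : String) :
    Nat → List (String × Nat × Int) → PySem.Dict String Int → Option Int
  | 0, _, _ => none
  | _+1, [], _ => none                                    -- unreachable from a singleton start stack
  | fuel+1, (v, i, acc) :: rest, memo =>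
    if v == goal then finishM (runM edges goal fuel) 1 rest memo
    else
      match edges.get? v with
      | none => finishM (runM edges goal fuel) 0 rest memo
      | some nbrs =>
        match nbrs[i]? with                               -- i < len(nbrs) then nbrs[i]; i is a Nat (Python's i stays ≥ 0)
        | some nxt =>
          match memo.get? nxt with
          | some x => runM edges goal fuel ((v, i+1, acc + x) :: rest) memo
          | none => runM edges goal fuel ((nxt, 0, 0) :: (v, i+1, acc) :: rest) memo
        | none => finishM (runM edges goal fuel) acc rest (memo.insert v acc)

def maxLen (edges : List (String × List String)) : Nat :=
  edges.foldr (fun p m => max p.2.length m) 0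

def dfs_alt (edges : List (String × List String)) (vertex : String) (goal : String) (cache : List (String × Int)) : Int :=
  match runM (PySem.Dict.mk edges) goal ((maxLen edges + 2) ^ (2 * (edges.length + 2)))
      [(vertex, 0, 0)] (PySem.Dict.mk cache) with
  | some r => r
  | none => 0

-- ===== PRECONDITION & SPEC =====
-- longPath edges goal cache n v = "there is a chain of n edges out of v that avoids the goal and the
-- initially cached vertices".  Pre_dfs says no such chain of |edges|+1 edges leaves `vertex` — exactly
-- the inputs on which Python A's recursion returns; on the excluded inputs A hits RecursionError
-- (arbitrarily long uncached chains, i.e. a reachable cycle).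
def longPath (edges : List (String × List String)) (goal : String) (cache : List (String × Int)) :
    Nat → String → Bool
  | 0, _ => true
  | n+1, v =>
    !(v == goal) &&
      (match (PySem.Dict.mk edges).get? v with
       | some nbrs => nbrs.any (fun nxt => !((PySem.Dict.mk cache).contains nxt) && longPath edges goal cache n nxt)
       | none => false)

def Pre_dfs (edges : List (String × List String)) (vertex : String) (goal : String) (cache : List (String × Int)) : Prop :=
  longPath edges goal cache (edges.length + 1) vertex = false
instance (edges : List (String × List String)) (vertex : String) (goal : String) (cache : List (String × Int)) : Decidable (Pre_dfs edges vertex goal cache) := by unfold Pre_dfs; infer_instance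

def pvWitness_dfs : (List (String × List String)) × String × String × (List (String × Int)) :=
  ([("a", ["b", "g"]), ("b", ["g", "x"])], "a", "g", [("c", 5)])

def Spec_dfs (edges : List (String × List String)) (vertex : String) (goal : String) (cache : List (String × Int)) (out : Int) : Prop := out = dfs_alt edges vertex goal cache
instance (edges : List (String × List String)) (vertex : String) (goal : String) (cache : List (String × Int)) (out : Int) : Decidable (Spec_dfs edges vertex goal cache out) := by unfold Spec_dfs; infer_instance

-- ===== CLAIM (what is proved, stated in full; the proofs are below) =====
def Claim_equal_dfs : Prop := ∀ (edges : List (String × List String)) (vertex : String) (goal : String) (cache : List (String × Int)), Dom_dfs edges vertex goal cache → Pre_dfs edges vertex goal cache → Spec_dfs edges vertex goal cache (dfs edges vertex goal cache)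

-- ===== LEMMAS AND PROOFS =====

-- cache keys only grow during A's run
def Grows (c c' : PySem.Dict String Int) : Prop :=
  ∀ k, c.contains k = true → c'.contains k = true

theorem Grows_refl (c : PySem.Dict String Int) : Grows c c := fun _ h => h

theorem Grows_trans {a b c : PySem.Dict String Int} (h1 : Grows a b) (h2 : Grows b c) : Grows a c :=
  fun k h => h2 k (h1 k h)

theorem Grows_insert (c : PySem.Dict String Int) (v : String) (x : Int) :
    Grows c (c.insert v x) := by
  intro k h
  rw [PySem.Dict.contains_insert]
  simp [h]

-- the loop of a fuel-(n+2) call of A succeeds when every neighbour is cached or has no long path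
theorem dfsLoop_some (edges : List (String × List String)) (goal : String) (cache0 : List (String × Int)) (n : Nat)
    (IH : ∀ v c, Grows (PySem.Dict.mk cache0) c → longPath edges goal cache0 n v = false →
      ∃ r c', dfsA (PySem.Dict.mk edges) goal (n+1) v c = some (r, c') ∧ Grows c c') :
    ∀ nbrs res c, Grows (PySem.Dict.mk cache0) c →
      (∀ nxt ∈ nbrs, (PySem.Dict.mk cache0).contains nxt = true ∨ longPath edges goal cache0 n nxt = false) →
      ∃ r c', dfsLoop (fun nx cc => dfsA (PySem.Dict.mk edges) goal (n+1) nx cc) nbrs res c = some (r, c') ∧ Grows c c' := by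
  intro nbrs
  induction nbrs with
  | nil => intro res c hg _; exact ⟨res, c, rfl, Grows_refl c⟩
  | cons nxt rest ihl =>
    intro res c hg hall
    simp only [dfsLoop]
    cases hc : c.get? nxt with
    | some x =>
      obtain ⟨r, c', h, hgr⟩ := ihl (res + x) c hg (fun y hy => hall y (by simp [hy]))
      exact ⟨r, c', h, hgr⟩
    | none =>
      have hnext : longPath edges goal cache0 n nxt = false := by
        rcases hall nxt (by simp) with h0 | h0
        · exfalso
          have hcc := hg nxt h0
          rw [PySem.Dict.contains_eq_isSome_get?, hc] at hcc
          simp at hcc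
        · exact h0
      obtain ⟨r1, c1, hA, hg1⟩ := IH nxt c hg hnext
      obtain ⟨r, c', h, hgr⟩ := ihl (res + r1) c1 (Grows_trans hg hg1) (fun y hy => hall y (by simp [hy]))
      refine ⟨r, c', ?_, Grows_trans hg1 hgr⟩
      simp only [hA]
      exact h

-- termination of A's recursion under Pre_
theorem dfsA_some (edges : List (String × List String)) (goal : String) (cache0 : List (String × Int)) :
    ∀ fuel v c, Grows (PySem.Dict.mk cache0) c → longPath edges goal cache0 fuel v = false →
      ∃ r c', dfsA (PySem.Dict.mk edges) goal (fuel+1) v c = some (r, c') ∧ Grows c c' := by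
  intro fuel
  induction fuel using Nat.strong_induction_on with
  | _ fuel IH =>
    intro v c hg hlp
    cases fuel with
    | zero => simp [longPath] at hlp
    | succ n =>
      by_cases hvg : (v == goal) = true
      · refine ⟨1, c, ?_, Grows_refl c⟩
        conv_lhs => rw [dfsA]
        rw [if_pos hvg]
      · have hvg' : (v == goal) = false := Bool.eq_false_iff.mpr hvg
        cases he : (PySem.Dict.mk edges).get? v with
        | none =>
          refine ⟨0, c, ?_, Grows_refl c⟩
          conv_lhs => rw [dfsA]
          rw [if_neg hvg]
          simp only [he]
        | some nbrs =>
          simp only [longPath, he, hvg', Bool.not_false, Bool.true_and] at hlp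
          have hall : ∀ nxt ∈ nbrs, (PySem.Dict.mk cache0).contains nxt = true ∨
              longPath edges goal cache0 n nxt = false := by
            intro nxt hmem
            have hnxt := (List.any_eq_false.mp hlp) nxt hmem
            have hf : (!((PySem.Dict.mk cache0).contains nxt) && longPath edges goal cache0 n nxt) = false :=
              Bool.eq_false_iff.mpr hnxt
            rcases Bool.and_eq_false_iff.mp hf with h1 | h1
            · exact Or.inl (by simpa using h1)
            · exact Or.inr h1
          obtain ⟨res, cmid, hloop, hgr⟩ :=
            dfsLoop_some edges goal cache0 n
              (fun v c a b => IH n (Nat.lt_succ_self n) v c a b) nbrs 0 c hg hall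
          refine ⟨res, cmid.insert v res, ?_, Grows_trans hgr (Grows_insert cmid v res)⟩
          conv_lhs => rw [dfsA]
          rw [if_neg hvg]
          simp only [he, hloop]

-- simulation: the machine reproduces the loop of a fuel-(n+1) call of A
theorem simLoop (E : PySem.Dict String (List String)) (goal : String) (n : Nat) (X : Nat)
    (IHsim : ∀ v c r c', dfsA E goal n v c = some (r, c') →
      ∃ g, g ≤ X ∧ ∀ f2 stack,
        runM E goal (g + f2) ((v, 0, 0) :: stack) c = finishM (runM E goal f2) r stack c')
    (v : String) (nbrs : List String) (hv : E.get? v = some nbrs) (hvg : (v == goal) = false) :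
    ∀ d i acc c res cmid, nbrs.drop i = d →
      dfsLoop (fun nx cc => dfsA E goal n nx cc) d acc c = some (res, cmid) →
      ∃ g, g ≤ d.length * (X + 1) + 1 ∧ ∀ f2 stack,
        runM E goal (g + f2) ((v, i, acc) :: stack) c
          = finishM (runM E goal f2) res stack (cmid.insert v res) := by
  intro d
  induction d with
  | nil =>
    intro i acc c res cmid hd hloop
    simp only [dfsLoop, Option.some.injEq, Prod.mk.injEq] at hloop
    obtain ⟨hres, hcm⟩ := hloop
    subst hres; subst hcm
    have hi : nbrs[i]? = none := by rw [← List.head?_drop, hd]; rfl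
    refine ⟨1, by omega, ?_⟩
    intro f2 stack
    have h1 : 1 + f2 = f2 + 1 := by omega
    rw [h1]
    simp only [runM, hvg, hv, hi]
    rfl
  | cons nxt d' ihl =>
    intro i acc c res cmid hd hloop
    have hi : nbrs[i]? = some nxt := by rw [← List.head?_drop, hd]; rfl
    have hd' : nbrs.drop (i+1) = d' := by
      rw [← List.tail_drop, hd]; rfl
    simp only [dfsLoop] at hloop
    cases hc : c.get? nxt with
    | some x =>
      simp only [hc] at hloop
      obtain ⟨g1, hg1, hrun1⟩ := ihl (i+1) (acc + x) c res cmid hd' hloop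
      refine ⟨g1 + 1, ?_, ?_⟩
      · have hexp : (d'.length + 1) * (X + 1) = d'.length * (X + 1) + X + 1 := by ring
        simp only [List.length_cons, hexp]
        omega
      · intro f2 stack
        have h1 : g1 + 1 + f2 = (g1 + f2) + 1 := by omega
        rw [h1]
        simp only [runM, hvg, hv, hi, hc]
        exact hrun1 f2 stack
    | none =>
      simp only [hc] at hloop
      cases hA : dfsA E goal n nxt c with
      | none => simp only [hA] at hloop; cases hloop
      | some rc =>
        obtain ⟨r1, c1⟩ := rc
        simp only [hA] at hloop
        obtain ⟨g2, hg2, hrun2⟩ := IHsim nxt c r1 c1 hA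
        obtain ⟨g3, hg3, hrun3⟩ := ihl (i+1) (acc + r1) c1 res cmid hd' hloop
        refine ⟨1 + g2 + g3, ?_, ?_⟩
        · have hexp : (d'.length + 1) * (X + 1) = d'.length * (X + 1) + X + 1 := by ring
          simp only [List.length_cons, hexp]
          omega
        · intro f2 stack
          have h1 : 1 + g2 + g3 + f2 = (g2 + (g3 + f2)) + 1 := by omega
          rw [h1]
          simp only [runM, hvg, hv, hi, hc]
          have h2 := hrun2 (g3 + f2) ((v, i+1, acc) :: stack)
          rw [h2]
          simp only [finishM]
          exact hrun3 f2 stack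

-- simulation: the machine reproduces A's recursion, with a step-count bound
theorem sim (E : PySem.Dict String (List String)) (goal : String) (LL : Nat)
    (hLL : ∀ v nbrs, E.get? v = some nbrs → nbrs.length ≤ LL) :
    ∀ fuel v c r c', dfsA E goal fuel v c = some (r, c') →
      ∃ g, g ≤ (LL+2) ^ (2*fuel) ∧ ∀ f2 stack,
        runM E goal (g + f2) ((v, 0, 0) :: stack) c = finishM (runM E goal f2) r stack c' := by
  intro fuel
  induction fuel using Nat.strong_induction_on with
  | _ fuel IH =>
    intro v c r c' h
    cases fuel with
    | zero => simp [dfsA] at h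
    | succ n =>
      have hone : 1 ≤ (LL+2) ^ (2*(n+1)) := Nat.one_le_pow _ _ (by omega)
      simp only [dfsA] at h
      by_cases hvg : (v == goal) = true
      · rw [if_pos hvg] at h
        simp only [Option.some.injEq, Prod.mk.injEq] at h
        obtain ⟨hr, hc⟩ := h; subst hr; subst hc
        refine ⟨1, hone, ?_⟩
        intro f2 stack
        have h1 : 1 + f2 = f2 + 1 := by omega
        rw [h1]
        simp only [runM, hvg]
        rfl
      · rw [if_neg hvg] at h
        have hvg' : (v == goal) = false := by simp [Bool.eq_false_iff]; exact fun hh => hvg (by simp [hh])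
        cases he : E.get? v with
        | none =>
          rw [he] at h
          simp only [Option.some.injEq, Prod.mk.injEq] at h
          obtain ⟨hr, hc⟩ := h; subst hr; subst hc
          refine ⟨1, hone, ?_⟩
          intro f2 stack
          have h1 : 1 + f2 = f2 + 1 := by omega
          rw [h1]
          simp only [runM, hvg', he]
          rfl
        | some nbrs =>
          rw [he] at h
          cases hloop : dfsLoop (fun nx cc => dfsA E goal n nx cc) nbrs 0 c with
          | none => simp only [hloop] at h; cases h
          | some rc =>
            obtain ⟨res, cmid⟩ := rc
            simp only [hloop, Option.some.injEq, Prod.mk.injEq] at h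
            obtain ⟨hr, hc⟩ := h; subst hr; subst hc
            obtain ⟨g, hgb, hrun⟩ :=
              simLoop E goal n ((LL+2) ^ (2*n)) (fun v c r c' hh => IH n (Nat.lt_succ_self n) v c r c' hh)
                v nbrs he hvg' nbrs 0 0 c res cmid List.drop_zero hloop
            have hX : 1 ≤ (LL+2) ^ (2*n) := Nat.one_le_pow _ _ (by omega)
            refine ⟨g, ?_, hrun⟩
            calc g ≤ nbrs.length * ((LL+2) ^ (2*n) + 1) + 1 := hgb
              _ ≤ LL * ((LL+2) ^ (2*n) + 1) + 1 := by
                  have := hLL v nbrs he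
                  gcongr
              _ = LL * (LL+2) ^ (2*n) + (LL + 1) := by ring
              _ ≤ LL * (LL+2) ^ (2*n) + (LL + 1) * (LL+2) ^ (2*n) := by
                  have : LL + 1 ≤ (LL + 1) * (LL+2) ^ (2*n) := Nat.le_mul_of_pos_right _ (by omega)
                  omega
              _ = (2*LL+1) * (LL+2) ^ (2*n) := by ring
              _ ≤ (LL+2)^2 * (LL+2) ^ (2*n) := by
                  have hsq : (LL+2)^2 = LL*LL + 4*LL + 4 := by ring
                  have : 2*LL+1 ≤ (LL+2)^2 := by rw [hsq]; omega
                  gcongr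
              _ = (LL+2) ^ (2*(n+1)) := by
                  have h2 : 2*(n+1) = 2 + 2*n := by ring
                  rw [h2, pow_add]

theorem maxLen_spec (edges : List (String × List String)) :
    ∀ v nbrs, (PySem.Dict.mk edges).get? v = some nbrs → nbrs.length ≤ maxLen edges := by
  induction edges with
  | nil => intro v nbrs h; simp [PySem.Dict.get?] at h
  | cons p tl ih =>
    intro v nbrs h
    obtain ⟨k, vs⟩ := p
    rw [PySem.Dict.get?_mk_cons] at h
    by_cases hk : (k == v) = true
    · rw [if_pos hk] at h
      simp only [Option.some.injEq] at h
      subst h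
      simp [maxLen]
    · rw [if_neg hk] at h
      have := ih v nbrs h
      simp only [maxLen, List.foldr_cons] at *
      omega

-- ===== VERDICT (by name: the statement is the Claim_ definition above) =====
theorem dfs_spec : Claim_equal_dfs := by
  intro edges vertex goal cache _hdom hpre
  obtain ⟨r, c', hA, -⟩ :=
    dfsA_some edges goal cache (edges.length + 1) vertex (PySem.Dict.mk cache)
      (Grows_refl _) hpre
  obtain ⟨g, hg, hrun⟩ :=
    sim (PySem.Dict.mk edges) goal (maxLen edges) (maxLen_spec edges)
      (edges.length + 2) vertex (PySem.Dict.mk cache) r c' hA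
  have hgM : g ≤ (maxLen edges + 2) ^ (2 * (edges.length + 2)) := hg
  have hrun' := hrun ((maxLen edges + 2) ^ (2 * (edges.length + 2)) - g) []
  have hM : g + ((maxLen edges + 2) ^ (2 * (edges.length + 2)) - g)
      = (maxLen edges + 2) ^ (2 * (edges.length + 2)) := by omega
  rw [hM] at hrun'
  show dfs edges vertex goal cache = dfs_alt edges vertex goal cache
  unfold dfs dfs_alt
  rw [hA, hrun']
  rfl
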